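-- pv_equiv track=rewrite | github.com/ywb-python/Python_excerise | data_structure_algorithms/chapter_01/innovate.py | check_int_sequence_exist_two_different_number_and_product_is_odd
-- ===== SOURCE A (Python) =====
-- def check_int_sequence_exist_two_different_number_and_product_is_odd(sequence):
--     """
--     接收一个整数序列，判断该序列是否存在两个互不相同且他们的积为奇数的数
--     :param sequence:
--     :return:
--     """
--     set_sequence = set(sequence)
--     if len(set_sequence) < 2:
--         return False
--     for one in set_sequence:
--         for other in set_sequence:
--             if (one != other) and ((one * other) % 2 == 1):
--                 return True
--     return False
-- ===== SOURCE B (Python) =====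
-- def check_int_sequence_exist_two_different_number_and_product_is_odd(sequence):
--     # One pass, O(1) extra space: remember the first odd value seen;
--     # answer is True as soon as a different odd value appears.
--     first = None
--     for x in sequence:
--         if x % 2:
--             if first is None:
--                 first = x
--             elif x != first:
--                 return True
--     return False
-- ===== Notes on version B (the rewrite author's own statement) =====
-- stated objective: faster
-- what changed: Replaced the set-building plus quadratic double scan over the set with a single O(1)-space pass that remembers the first odd value and returns True on seeing a different odd value (a product of two numbers is odd iff both are odd).
import Mathlib
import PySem

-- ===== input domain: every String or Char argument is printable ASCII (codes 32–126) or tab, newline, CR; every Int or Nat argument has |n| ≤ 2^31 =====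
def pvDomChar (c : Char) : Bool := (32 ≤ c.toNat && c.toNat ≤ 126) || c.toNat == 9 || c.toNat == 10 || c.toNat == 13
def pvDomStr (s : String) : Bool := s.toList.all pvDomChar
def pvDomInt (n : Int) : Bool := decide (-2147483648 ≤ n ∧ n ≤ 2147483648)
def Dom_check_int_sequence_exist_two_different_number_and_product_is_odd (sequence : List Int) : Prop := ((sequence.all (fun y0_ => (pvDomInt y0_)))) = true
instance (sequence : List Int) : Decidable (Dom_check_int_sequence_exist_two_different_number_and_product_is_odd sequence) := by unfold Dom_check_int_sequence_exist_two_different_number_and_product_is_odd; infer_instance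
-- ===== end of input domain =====

-- B replaces A's set construction + quadratic double scan with a single O(1)-space pass
-- (first odd value remembered; True on a different odd value); objective: faster (asymptotic).

-- ===== PORT A =====
def check_int_sequence_exist_two_different_number_and_product_is_odd (sequence : List Int) : Bool :=
  let set_sequence : PySem.Set Int := PySem.Set.ofList sequence
  if set_sequence.length < 2 then false
  else
    -- 'for one in set: for other in set: if …: return True' — an existence scan, order-independent
    set_sequence.any (fun one =>
      set_sequence.any (fun other =>
        (one != other) && (PySem.Int.mod (one * other) 2 == 1)))

-- ===== PORT B =====
-- the loop of Source B: 'first' is the first odd value seen so far (None before one is seen)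
def pvAltLoop : Option Int → List Int → Bool
  | _, [] => false
  | first, x :: rest =>
    if PySem.Int.mod x 2 ≠ 0 then
      match first with
      | none => pvAltLoop (some x) rest
      | some f => if x ≠ f then true else pvAltLoop (some f) rest
    else pvAltLoop first rest

def check_int_sequence_exist_two_different_number_and_product_is_odd_alt (sequence : List Int) : Bool :=
  pvAltLoop none sequence

-- ===== PRECONDITION & SPEC =====
def Spec_check_int_sequence_exist_two_different_number_and_product_is_odd (sequence : List Int) (out : Bool) : Prop := out = check_int_sequence_exist_two_different_number_and_product_is_odd_alt sequence
instance (sequence : List Int) (out : Bool) : Decidable (Spec_check_int_sequence_exist_two_different_number_and_product_is_odd sequence out) := by unfold Spec_check_int_sequence_exist_two_different_number_and_product_is_odd; infer_instance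

-- ===== CLAIM (what is proved, stated in full; the proofs are below) =====
def Claim_equal_check_int_sequence_exist_two_different_number_and_product_is_odd : Prop := ∀ (sequence : List Int), Dom_check_int_sequence_exist_two_different_number_and_product_is_odd sequence → Spec_check_int_sequence_exist_two_different_number_and_product_is_odd sequence (check_int_sequence_exist_two_different_number_and_product_is_odd sequence)

-- ===== LEMMAS AND PROOFS =====

theorem pv_mod_two (x : Int) : PySem.Int.mod x 2 = x % 2 :=
  PySem.Int.mod_eq_emod_of_pos (by norm_num)

theorem pv_prod_odd_iff (a b : Int) : (a * b) % 2 = 1 ↔ (a % 2 = 1 ∧ b % 2 = 1) := by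
  rcases Int.emod_two_eq a with h | h <;> rcases Int.emod_two_eq b with h' | h' <;>
    rw [Int.mul_emod, h, h'] <;> simp

-- The shared characterisation: two distinct odd members exist.
def pvHasTwoOdds (s : List Int) : Prop :=
  ∃ a ∈ s, ∃ b ∈ s, a ≠ b ∧ a % 2 = 1 ∧ b % 2 = 1

theorem pvA_iff (s : List Int) :
    check_int_sequence_exist_two_different_number_and_product_is_odd s = true ↔ pvHasTwoOdds s := by
  unfold check_int_sequence_exist_two_different_number_and_product_is_odd pvHasTwoOdds
  simp only []
  split
  · rename_i hlen
    simp only [Bool.false_eq_true, false_iff]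
    rintro ⟨a, ha, b, hb, hne, -, -⟩
    rw [← PySem.Set.mem_ofList (xs := s)] at ha hb
    rcases hs : PySem.Set.ofList s with _ | ⟨x, _ | ⟨y, t⟩⟩ <;> rw [hs] at ha hb <;>
      simp_all
  · simp only [List.any_eq_true, PySem.Set.mem_ofList, Bool.and_eq_true, bne_iff_ne,
      beq_iff_eq, pv_mod_two, pv_prod_odd_iff]

theorem pv_odd_ne_zero_iff (x : Int) : (x % 2 ≠ 0) ↔ x % 2 = 1 := by
  rcases Int.emod_two_eq x with h | h <;> simp [h]

theorem pvLoop_some_iff (f : Int) (l : List Int) :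
    pvAltLoop (some f) l = true ↔ ∃ b ∈ l, b % 2 = 1 ∧ b ≠ f := by
  induction l with
  | nil => simp [pvAltLoop]
  | cons x rest ih =>
    simp only [pvAltLoop, pv_mod_two]
    by_cases hx : x % 2 ≠ 0
    · rw [if_pos hx]
      by_cases hxf : x ≠ f
      · rw [if_pos hxf]
        simp only [true_iff]
        exact ⟨x, by simp, (pv_odd_ne_zero_iff x).1 hx, hxf⟩
      · push Not at hxf
        rw [if_neg (by simp [hxf]), ih]
        constructor
        · rintro ⟨b, hb, h1, h2⟩; exact ⟨b, by simp [hb], h1, h2⟩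
        · rintro ⟨b, hb, h1, h2⟩
          rcases List.mem_cons.1 hb with rfl | hb
          · exact absurd hxf h2
          · exact ⟨b, hb, h1, h2⟩
    · rw [if_neg hx, ih]
      push Not at hx
      constructor
      · rintro ⟨b, hb, h1, h2⟩; exact ⟨b, by simp [hb], h1, h2⟩
      · rintro ⟨b, hb, h1, h2⟩
        rcases List.mem_cons.1 hb with rfl | hb
        · omega
        · exact ⟨b, hb, h1, h2⟩

theorem pvB_iff (s : List Int) :
    check_int_sequence_exist_two_different_number_and_product_is_odd_alt s = true ↔ pvHasTwoOdds s := by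
  unfold check_int_sequence_exist_two_different_number_and_product_is_odd_alt
  induction s with
  | nil => simp [pvAltLoop, pvHasTwoOdds]
  | cons x rest ih =>
    simp only [pvAltLoop, pv_mod_two]
    by_cases hx : x % 2 ≠ 0
    · rw [if_pos hx, pvLoop_some_iff]
      have hx1 : x % 2 = 1 := (pv_odd_ne_zero_iff x).1 hx
      constructor
      · rintro ⟨b, hb, h1, h2⟩
        exact ⟨x, by simp, b, by simp [hb], fun h => h2 h.symm, hx1, h1⟩
      · rintro ⟨a, ha, b, hb, hne, h1, h2⟩
        rcases List.mem_cons.1 ha with rfl | ha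
        · rcases List.mem_cons.1 hb with rfl | hb
          · exact absurd rfl hne
          · exact ⟨b, hb, h2, fun h => hne h.symm⟩
        · by_cases hax : a = x
          · subst hax
            rcases List.mem_cons.1 hb with rfl | hb
            · exact absurd rfl hne
            · exact ⟨b, hb, h2, fun h => hne h.symm⟩
          · exact ⟨a, ha, h1, hax⟩
    · rw [if_neg hx, ih]
      push Not at hx
      unfold pvHasTwoOdds
      constructor
      · rintro ⟨a, ha, b, hb, hne, h1, h2⟩
        exact ⟨a, by simp [ha], b, by simp [hb], hne, h1, h2⟩
      · rintro ⟨a, ha, b, hb, hne, h1, h2⟩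
        rcases List.mem_cons.1 ha with rfl | ha
        · omega
        rcases List.mem_cons.1 hb with rfl | hb
        · omega
        exact ⟨a, ha, b, hb, hne, h1, h2⟩

-- ===== VERDICT (by name: the statement is the Claim_ definition above) =====
theorem check_int_sequence_exist_two_different_number_and_product_is_odd_spec : Claim_equal_check_int_sequence_exist_two_different_number_and_product_is_odd := by
  intro s _
  unfold Spec_check_int_sequence_exist_two_different_number_and_product_is_odd
  rw [Bool.eq_iff_iff, pvA_iff, pvB_iff]
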